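-- pv_equiv track=rewrite | github.com/Code-2-Create/NSCQuizzer | app.py | extract_subject_fallback_text
-- ===== SOURCE A (Python) =====
-- def extract_subject_fallback_text(syllabus_full_text: str, keywords: list[str]) -> str:
--     lines = [line.strip() for line in syllabus_full_text.splitlines() if line.strip()]
--     matched_lines: list[str] = []
--
--     for index, line in enumerate(lines):
--         lower_line = line.lower()
--         if any(keyword in lower_line for keyword in keywords):
--             start = max(index - 2, 0)
--             end = min(index + 5, len(lines))
--             matched_lines.extend(lines[start:end])
--
--     deduped_lines: list[str] = []
--     seen = set()
--     for line in matched_lines: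
--         normalized = line.lower()
--         if normalized in seen:
--             continue
--         seen.add(normalized)
--         deduped_lines.append(line)
--
--     return "\n".join(deduped_lines)
-- ===== SOURCE B (Python) =====
-- def extract_subject_fallback_text(syllabus_full_text: str, keywords: list[str]) -> str:
--     lines = [line.strip() for line in syllabus_full_text.splitlines() if line.strip()]
--     matched = [any(keyword in line.lower() for keyword in keywords) for line in lines]
--     result: list[str] = []
--     seen = set()
--     for j, line in enumerate(lines):
--         if any(matched[max(j - 4, 0):j + 3]):
--             normalized = line.lower()
--             if normalized not in seen:
--                 seen.add(normalized)
--                 result.append(line)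
--     return "\n".join(result)
-- ===== Notes on version B (the rewrite author's own statement) =====
-- stated objective: alternative
-- what changed: Instead of materialising a context window for every matching line and deduplicating the concatenation in a second pass, B marks matched lines once and makes a single ordered pass over the lines, emitting each line whose 7-line neighbourhood contains a match, deduplicating by lowercased text inline.
import Mathlib
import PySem

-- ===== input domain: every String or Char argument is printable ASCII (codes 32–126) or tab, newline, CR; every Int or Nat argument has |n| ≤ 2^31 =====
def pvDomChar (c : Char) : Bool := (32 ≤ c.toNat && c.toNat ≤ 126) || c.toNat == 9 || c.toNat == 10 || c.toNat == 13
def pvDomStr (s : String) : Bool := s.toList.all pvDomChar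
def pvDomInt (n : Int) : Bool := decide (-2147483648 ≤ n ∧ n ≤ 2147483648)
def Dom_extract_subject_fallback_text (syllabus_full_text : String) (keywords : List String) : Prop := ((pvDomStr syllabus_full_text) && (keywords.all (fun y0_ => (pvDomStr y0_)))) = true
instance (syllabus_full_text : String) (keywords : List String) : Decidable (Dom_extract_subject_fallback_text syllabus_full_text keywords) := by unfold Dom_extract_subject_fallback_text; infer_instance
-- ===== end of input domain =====

-- B is an alternative decomposition of the same extraction: instead of materialising every
-- context window and deduplicating afterwards, it marks matched lines once and makes a single
-- ordered pass that emits each line whose neighbourhood contains a match, deduplicating inline.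

-- ===== PORT A =====
-- shared by both ports: the identical first line of both Pythons
-- lines = [line.strip() for line in syllabus_full_text.splitlines() if line.strip()]
def pvLines (syllabus_full_text : String) : List String :=
  (PySem.Str.splitlines syllabus_full_text).filterMap (fun line =>
    if PySem.Str.strip line = "" then none else some (PySem.Str.strip line))

-- any(keyword in line.lower() for keyword in keywords)
def pvMatch (keywords : List String) (line : String) : Bool :=
  keywords.any (fun keyword => PySem.Str.isIn keyword (PySem.Str.lower line))

def extract_subject_fallback_text (syllabus_full_text : String) (keywords : List String) : String :=
  let lines := pvLines syllabus_full_text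
  let matched_lines := (PySem.List.enumerate lines).foldl
    (fun acc p =>
      if pvMatch keywords p.2 then
        acc ++ PySem.List.slice lines (some (max (p.1 - 2) 0)) (some (min (p.1 + 5) (PySem.List.len lines)))
      else acc) []
  let dedup := matched_lines.foldl
    (fun (st : List String × PySem.Set String) line =>
      let normalized := PySem.Str.lower line
      if st.2.contains normalized then st
      else (st.1 ++ [line], st.2.add normalized)) ([], PySem.Set.empty)
  PySem.Str.join "\n" dedup.1

-- ===== PORT B =====
def extract_subject_fallback_text_alt (syllabus_full_text : String) (keywords : List String) : String :=
  let lines := pvLines syllabus_full_text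
  let matched := lines.map (fun line => pvMatch keywords line)
  let result := (PySem.List.enumerate lines).foldl
    (fun (st : List String × PySem.Set String) p =>
      if (PySem.List.slice matched (some (max (p.1 - 4) 0)) (some (p.1 + 3))).any (fun b => b) then
        let normalized := PySem.Str.lower p.2
        if st.2.contains normalized then st
        else (st.1 ++ [p.2], st.2.add normalized)
      else st) ([], PySem.Set.empty)
  PySem.Str.join "\n" result.1

-- ===== PRECONDITION & SPEC =====
def Spec_extract_subject_fallback_text (syllabus_full_text : String) (keywords : List String) (out : String) : Prop := out = extract_subject_fallback_text_alt syllabus_full_text keywords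
instance (syllabus_full_text : String) (keywords : List String) (out : String) : Decidable (Spec_extract_subject_fallback_text syllabus_full_text keywords out) := by unfold Spec_extract_subject_fallback_text; infer_instance

-- ===== CLAIM (what is proved, stated in full; the proofs are below) =====
def Claim_equal_extract_subject_fallback_text : Prop := ∀ (syllabus_full_text : String) (keywords : List String), Dom_extract_subject_fallback_text syllabus_full_text keywords → Spec_extract_subject_fallback_text syllabus_full_text keywords (extract_subject_fallback_text syllabus_full_text keywords)

-- ===== LEMMAS AND PROOFS =====

-- first-occurrence dedup by key, with an explicit list of already-seen keys
def pvDK {α β : Type} [DecidableEq β] (f : α → β) : List α → List β → List α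
  | [], _ => []
  | x :: xs, seen => if f x ∈ seen then pvDK f xs seen else x :: pvDK f xs (f x :: seen)

-- the seen-keys list after running pvDK (only membership in it matters)
def pvSeen {α β : Type} [DecidableEq β] (f : α → β) : List α → List β → List β
  | [], s => s
  | x :: xs, s => if f x ∈ s then pvSeen f xs s else pvSeen f xs (f x :: s)

-- window of indices A extends for a match at index k, over n lines
def pvWin (n k : Nat) : List Nat := List.range' (k - 2) (min (k + 5) n - (k - 2))

-- "some match at index < K has a window covering j"
def pvIncB (n : Nat) (m : Nat → Bool) (K j : Nat) : Bool :=
  decide (∃ i, i < K ∧ m i = true ∧ i - 2 ≤ j ∧ j < min (i + 5) n)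

-- A's concatenated windows (as indices) for matches below K
def pvW (n : Nat) (m : Nat → Bool) (K : Nat) : List Nat :=
  ((List.range K).filter m).flatMap (pvWin n)

theorem pvDK_congr_seen {α β : Type} [DecidableEq β] (f : α → β) (xs : List α)
    (s₁ s₂ : List β) (h : ∀ y, y ∈ s₁ ↔ y ∈ s₂) : pvDK f xs s₁ = pvDK f xs s₂ := by
  induction xs generalizing s₁ s₂ with
  | nil => rfl
  | cons x xs ih =>
    simp only [pvDK]
    by_cases hx : f x ∈ s₁
    · rw [if_pos hx, if_pos ((h _).mp hx), ih s₁ s₂ h]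
    · rw [if_neg hx, if_neg (fun hc => hx ((h _).mpr hc)), ih]
      intro y; simp [h y]

theorem pvDK_append {α β : Type} [DecidableEq β] (f : α → β) (xs ys : List α) (s : List β) :
    pvDK f (xs ++ ys) s = pvDK f xs s ++ pvDK f ys (pvSeen f xs s) := by
  induction xs generalizing s with
  | nil => rfl
  | cons x xs ih =>
    simp only [List.cons_append, pvDK, pvSeen]
    by_cases hx : f x ∈ s
    · rw [if_pos hx, if_pos hx, if_pos hx, ih]
    · rw [if_neg hx, if_neg hx, if_neg hx, ih]
      simp

theorem mem_pvSeen {α β : Type} [DecidableEq β] (f : α → β) (xs : List α) (s : List β) (y : β) :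
    y ∈ pvSeen f xs s ↔ y ∈ s ∨ ∃ x ∈ xs, f x = y := by
  induction xs generalizing s with
  | nil => simp [pvSeen]
  | cons x xs ih =>
    simp only [pvSeen]
    by_cases hx : f x ∈ s
    · rw [if_pos hx, ih]
      constructor
      · rintro (h | h); · exact Or.inl h
        · exact Or.inr (by simpa using Or.inr (by exact h))
      · rintro (h | ⟨z, hz, rfl⟩); · exact Or.inl h
        · rcases List.mem_cons.mp hz with rfl | hz
          · exact Or.inl hx
          · exact Or.inr ⟨z, hz, rfl⟩
    · rw [if_neg hx, ih]
      simp only [List.mem_cons]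
      constructor
      · rintro ((rfl | h) | ⟨z, hz, rfl⟩)
        · exact Or.inr ⟨x, Or.inl rfl, rfl⟩
        · exact Or.inl h
        · exact Or.inr ⟨z, Or.inr hz, rfl⟩
      · rintro (h | ⟨z, (rfl | hz), rfl⟩)
        · exact Or.inl (Or.inr h)
        · exact Or.inl (Or.inl rfl)
        · exact Or.inr ⟨z, hz, rfl⟩

theorem pvDK_nodup {α : Type} [DecidableEq α] (xs : List α) (s : List α) (h : xs.Nodup) :
    pvDK id xs s = xs.filter (fun x => decide (x ∉ s)) := by
  induction xs generalizing s with
  | nil => rfl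
  | cons x xs ih =>
    rw [List.nodup_cons] at h
    simp only [pvDK, List.filter_cons, id]
    by_cases hx : x ∈ s
    · rw [if_pos hx, ih s h.2]
      simp [hx]
    · rw [if_neg hx, ih _ h.2]
      have hf : List.filter (fun a => decide (a ∉ x :: s)) xs
          = List.filter (fun a => decide (a ∉ s)) xs := by
        refine List.filter_congr fun a ha => ?_
        have : a ≠ x := fun hax => h.1 (hax ▸ ha)
        simp [List.mem_cons, this]
      rw [hf]
      simp [hx]

theorem foldl_dedup_eq_pvDK (xs : List String) (acc : List String) (seen : PySem.Set String) :
    (xs.foldl (fun (st : List String × PySem.Set String) line =>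
      if st.2.contains (PySem.Str.lower line) then st
      else (st.1 ++ [line], st.2.add (PySem.Str.lower line))) (acc, seen)).1
    = acc ++ pvDK PySem.Str.lower xs seen := by
  induction xs generalizing acc seen with
  | nil => simp [pvDK]
  | cons x xs ih =>
    simp only [List.foldl_cons, pvDK]
    by_cases hx : PySem.Str.lower x ∈ seen
    · rw [if_pos ((PySem.Set.contains_iff seen _).mpr hx), if_pos hx]
      exact ih acc seen
    · have hc : seen.contains (PySem.Str.lower x) = false := by
        rw [← Bool.not_eq_true, PySem.Set.contains_iff]; exact hx
      rw [hc]
      simp only [Bool.false_eq_true, if_false]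
      have hadd : seen.add (PySem.Str.lower x) = seen ++ [PySem.Str.lower x] := by
        simp [PySem.Set.add, hx]
      rw [hadd, ih, if_neg hx]
      rw [pvDK_congr_seen PySem.Str.lower xs (seen ++ [PySem.Str.lower x])
        (PySem.Str.lower x :: seen) (by intro y; simp [or_comm])]
      simp

theorem pvDK_map_pvDK {α γ β : Type} [DecidableEq α] [DecidableEq β] (f : γ → β) (g : α → γ) :
    ∀ (xs : List α) (s : List β) (t : List α), (∀ i ∈ t, f (g i) ∈ s) →
    pvDK f (xs.map g) s = pvDK f ((pvDK id xs t).map g) s := by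
  intro xs
  induction xs with
  | nil => intro s t _; rfl
  | cons x xs ih =>
    intro s t hinv
    simp only [List.map_cons, pvDK, id]
    by_cases hxt : x ∈ t
    · rw [if_pos hxt, if_pos (hinv x hxt)]
      exact ih s t hinv
    · rw [if_neg hxt]
      simp only [List.map_cons, pvDK]
      by_cases hks : f (g x) ∈ s
      · rw [if_pos hks, if_pos hks]
        refine ih s (x :: t) ?_
        intro i hi
        rcases List.mem_cons.mp hi with rfl | hi
        · exact hks
        · exact hinv i hi
      · rw [if_neg hks, if_neg hks]
        refine congrArg _ (ih (f (g x) :: s) (x :: t) ?_)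
        intro i hi
        rcases List.mem_cons.mp hi with rfl | hi
        · exact List.mem_cons_self
        · exact List.mem_cons_of_mem _ (hinv i hi)

theorem foldl_enumerate_eq_range {α σ : Type} (lines : List α) (d : α) (F : σ → Int × α → σ)
    (init : σ) : (PySem.List.enumerate lines).foldl F init
      = (List.range lines.length).foldl (fun st (k : Nat) => F st ((k : Int), lines.getD k d)) init := by
  rw [PySem.List.enumerate_eq_map_pyRange lines d, List.foldl_map, PySem.List.pyRange_one,
    List.foldl_map]
  have hlen : (PySem.List.len lines - 0).toNat = lines.length := by
    simp [PySem.List.len_eq]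
  rw [hlen]
  refine PySem.List.foldl_congr_mem _ _ _ _ ?_
  intro acc k hk
  rw [List.mem_range] at hk
  simp [PySem.List.pyGetD_natCast]

theorem take_drop_eq_map_range' {α : Type} (xs : List α) (a c : Nat) (d : α) :
    (xs.drop a).take c = (List.range' a (min c (xs.length - a))).map (fun i => xs.getD i d) := by
  apply List.ext_getElem
  · simp
  · intro i h1 h2
    simp only [List.getElem_take, List.getElem_drop, List.getElem_map, List.getElem_range', one_mul]
    have hi : a + i < xs.length := by
      simp at h2; omega
    rw [List.getD_eq_getElem xs d hi]

theorem mem_pvWin (n k j : Nat) (hk : k < n) :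
    j ∈ pvWin n k ↔ k - 2 ≤ j ∧ j < min (k + 5) n := by
  unfold pvWin
  rw [List.mem_range']
  constructor
  · rintro ⟨i, hi, rfl⟩; omega
  · rintro ⟨h1, h2⟩; exact ⟨j - (k - 2), by omega, by omega⟩

theorem mem_pvW (n : Nat) (m : Nat → Bool) (K : Nat) (hK : K ≤ n) (j : Nat) :
    j ∈ pvW n m K ↔ ∃ i, i < K ∧ m i = true ∧ i - 2 ≤ j ∧ j < min (i + 5) n := by
  unfold pvW
  rw [List.mem_flatMap]
  constructor
  · rintro ⟨i, hi, hj⟩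
    rw [List.mem_filter, List.mem_range] at hi
    rw [mem_pvWin n i j (by omega)] at hj
    exact ⟨i, hi.1, hi.2, hj.1, hj.2⟩
  · rintro ⟨i, hiK, hmi, h1, h2⟩
    refine ⟨i, ?_, ?_⟩
    · rw [List.mem_filter, List.mem_range]; exact ⟨hiK, hmi⟩
    · rw [mem_pvWin n i j (by omega)]; exact ⟨h1, h2⟩

theorem pvWin_eq_filter (n k : Nat) (hk : k < n) :
    pvWin n k = (List.range n).filter (fun j => decide (k - 2 ≤ j ∧ j < min (k + 5) n)) := by
  have h1 : (pvWin n k).Nodup := List.nodup_range' _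
  have h2 : ((List.range n).filter (fun j => decide (k - 2 ≤ j ∧ j < min (k + 5) n))).Nodup :=
    List.Nodup.filter _ (List.nodup_range)
  have hp1 : (pvWin n k).Pairwise (· < ·) := List.pairwise_lt_range' _
  have hp2 : ((List.range n).filter (fun j => decide (k - 2 ≤ j ∧ j < min (k + 5) n))).Pairwise (· < ·) :=
    List.Pairwise.filter _ (List.pairwise_lt_range)
  have hperm := (List.perm_ext_iff_of_nodup h1 h2).mpr (fun j => by
    rw [mem_pvWin n k j hk, List.mem_filter, List.mem_range]
    constructor
    · rintro ⟨ha, hb⟩; exact ⟨by omega, by simp; omega⟩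
    · rintro ⟨ha, hb⟩; simp at hb; omega)
  exact List.Perm.eq_of_pairwise (fun a b ha hb hab hba => by omega) hp1 hp2 hperm

theorem filter_or_split {p q : Nat → Bool} (l : List Nat) (hs : l.Pairwise (· < ·))
    (hsep : ∀ a ∈ l, ∀ b ∈ l, p a = true → q b = true → p b = false → a < b) :
    l.filter (fun x => p x || q x) = l.filter p ++ l.filter (fun x => q x && !p x) := by
  induction l with
  | nil => simp
  | cons x l ih =>
    rw [List.pairwise_cons] at hs
    obtain ⟨hx, hl⟩ := hs
    have hsep' : ∀ a ∈ l, ∀ b ∈ l, p a = true → q b = true → p b = false → a < b :=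
      fun a ha b hb => hsep a (List.mem_cons_of_mem _ ha) b (List.mem_cons_of_mem _ hb)
    simp only [List.filter_cons]
    cases hpx : p x with
    | true =>
      simp [ih hl hsep']
    | false =>
      cases hqx : q x with
      | false =>
        simp only [Bool.or_self, Bool.false_eq_true, if_false, Bool.false_and]
        exact ih hl hsep'
      | true =>
        have hfp : l.filter p = [] := by
          rw [List.filter_eq_nil_iff]
          intro a ha hpa
          have h1 := hsep a (List.mem_cons_of_mem _ ha) x List.mem_cons_self hpa hqx hpx
          have h2 := hx a ha
          omega
        have hcong : l.filter (fun y => p y || q y) = l.filter (fun y => q y && !p y) := by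
          refine List.filter_congr fun a ha => ?_
          have hpa : p a = false := by
            by_contra hc
            exact absurd (List.filter_eq_nil_iff.mp hfp a ha) (by simp at hc ⊢; exact hc)
          simp [hpa]
        simp [hfp, hcong]

theorem pvDK_pvW (n : Nat) (m : Nat → Bool) : ∀ K, K ≤ n →
    pvDK id (pvW n m K) [] = (List.range n).filter (pvIncB n m K) := by
  intro K
  induction K with
  | zero =>
    intro _
    have : (List.range n).filter (pvIncB n m 0) = [] := by
      rw [List.filter_eq_nil_iff]
      intro j _
      simp [pvIncB]
    rw [this]
    rfl
  | succ K ih =>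
    intro hK1
    have hK : K ≤ n := by omega
    have hKn : K < n := by omega
    have hrec := ih hK
    unfold pvW
    rw [List.range_succ, List.filter_append]
    cases hmK : m K with
    | false =>
      have : (List.range K).filter m ++ [K].filter m = (List.range K).filter m := by
        simp [hmK]
      rw [this]
      rw [show ((List.range K).filter m).flatMap (pvWin n) = pvW n m K from rfl, hrec]
      refine List.filter_congr fun j hj => ?_
      simp only [pvIncB]
      refine decide_eq_decide.mpr ?_
      constructor
      · rintro ⟨i, h1, h2, h3, h4⟩; exact ⟨i, by omega, h2, h3, h4⟩
      · rintro ⟨i, h1, h2, h3, h4⟩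
        refine ⟨i, ?_, h2, h3, h4⟩
        rcases Nat.lt_succ_iff_lt_or_eq.mp h1 with h | rfl
        · exact h
        · rw [hmK] at h2; cases h2
    | true =>
      have : (List.range K).filter m ++ [K].filter m = (List.range K).filter m ++ [K] := by
        simp [hmK]
      rw [this, List.flatMap_append,
        show ((List.range K).filter m).flatMap (pvWin n) = pvW n m K from rfl]
      have hwinflat : List.flatMap (pvWin n) [K] = pvWin n K := by simp
      rw [hwinflat, pvDK_append, hrec,
        pvDK_nodup (pvWin n K) _ (by unfold pvWin; exact List.nodup_range' _)]
      -- rewrite the not-seen filter over pvWin into (cover && !inc) over range n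
      have hseen : ∀ j, (j ∈ pvSeen id (pvW n m K) []) ↔ pvIncB n m K j = true := by
        intro j
        rw [mem_pvSeen]
        simp only [List.not_mem_nil, false_or, id]
        rw [pvIncB, decide_eq_true_iff, ← mem_pvW n m K hK j]
        constructor
        · rintro ⟨x, hx, rfl⟩; exact hx
        · intro h; exact ⟨j, h, rfl⟩
      have hfilt : (pvWin n K).filter (fun j => decide (j ∉ pvSeen id (pvW n m K) []))
          = (List.range n).filter
              (fun j => decide (K - 2 ≤ j ∧ j < min (K + 5) n) && !(pvIncB n m K j)) := by
        rw [pvWin_eq_filter n K hKn, List.filter_filter]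
        refine List.filter_congr fun j hj => ?_
        by_cases h : pvIncB n m K j = true
        · simp [h, (hseen j).mpr h]
        · have hns : j ∉ pvSeen id (pvW n m K) [] := fun hc => h ((hseen j).mp hc)
          simp only [Bool.not_eq_true] at h
          simp [h, hns]
      rw [hfilt]
      rw [← filter_or_split (List.range n) List.pairwise_lt_range ?sep]
      case sep =>
        intro a _ b _ hpa hqb hpb
        rw [pvIncB, decide_eq_true_iff] at hpa
        obtain ⟨i, hiK, hmi, h3, h4⟩ := hpa
        rw [decide_eq_true_iff] at hqb
        by_contra hab
        have hb : pvIncB n m K b = true := by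
          rw [pvIncB, decide_eq_true_iff]
          exact ⟨i, hiK, hmi, by omega, by omega⟩
        rw [hpb] at hb; cases hb
      refine List.filter_congr fun j hj => ?_
      simp only [pvIncB]
      rw [show (decide (∃ i, i < K ∧ m i = true ∧ i - 2 ≤ j ∧ j < min (i + 5) n)
            || decide (K - 2 ≤ j ∧ j < min (K + 5) n))
          = decide ((∃ i, i < K ∧ m i = true ∧ i - 2 ≤ j ∧ j < min (i + 5) n)
            ∨ (K - 2 ≤ j ∧ j < min (K + 5) n)) by simp]
      refine decide_eq_decide.mpr ?_
      constructor
      · rintro (⟨i, h1, h2, h3, h4⟩ | ⟨h1, h2⟩)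
        · exact ⟨i, by omega, h2, h3, h4⟩
        · exact ⟨K, by omega, hmK, h1, h2⟩
      · rintro ⟨i, h1, h2, h3, h4⟩
        rcases Nat.lt_succ_iff_lt_or_eq.mp h1 with h | rfl
        · exact Or.inl ⟨i, h, h2, h3, h4⟩
        · exact Or.inr ⟨h3, h4⟩

theorem slice_window_eq (lines : List String) (k : Nat) :
    PySem.List.slice lines (some (max ((k : Int) - 2) 0)) (some (min ((k : Int) + 5) (PySem.List.len lines)))
      = (pvWin lines.length k).map (fun j => lines.getD j "") := by
  have e1 : max ((k : Int) - 2) 0 = ((k - 2 : Nat) : Int) := by omega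
  have e2 : min ((k : Int) + 5) (PySem.List.len lines)
      = ((min (k + 5) lines.length : Nat) : Int) := by
    rw [PySem.List.len_eq]; omega
  rw [e1, e2, PySem.List.slice_natCast, take_drop_eq_map_range' lines _ _ ""]
  unfold pvWin
  congr 2
  omega

theorem slice_any_eq (lines : List String) (keywords : List String) (k : Nat) (hk : k < lines.length) :
    ((PySem.List.slice (lines.map (fun line => pvMatch keywords line))
        (some (max ((k : Int) - 4) 0)) (some ((k : Int) + 3))).any (fun b => b))
      = pvIncB lines.length (fun i => pvMatch keywords (lines.getD i "")) lines.length k := by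
  have e1 : max ((k : Int) - 4) 0 = ((k - 4 : Nat) : Int) := by omega
  have e2 : ((k : Int) + 3) = ((k + 3 : Nat) : Int) := by omega
  rw [e1, e2, PySem.List.slice_natCast,
    take_drop_eq_map_range' (lines.map (fun line => pvMatch keywords line)) _ _ false]
  rw [Bool.eq_iff_iff, List.any_map, List.any_eq_true]
  simp only [Function.comp, List.mem_range', pvIncB, decide_eq_true_iff, List.length_map]
  constructor
  · rintro ⟨i, ⟨t, ht, rfl⟩, hb⟩
    have hlt : (k - 4) + 1 * t < lines.length := by omega
    rw [List.getD_eq_getElem _ _ (by simpa using hlt), List.getElem_map] at hb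
    refine ⟨(k - 4) + 1 * t, by omega, ?_, by omega, by omega⟩
    rwa [List.getD_eq_getElem _ _ hlt]
  · rintro ⟨i, h1, h2, h3, h4⟩
    refine ⟨i, ⟨i - (k - 4), by omega, by omega⟩, ?_⟩
    rw [List.getD_eq_getElem _ _ (by simpa using h1), List.getElem_map]
    rw [List.getD_eq_getElem _ _ h1] at h2
    exact h2

-- a guarded append loop collects the windows of the passing elements
theorem foldl_append_if_list {α β : Type} (p : α → Bool) (F : α → List β) (l : List α)
    (acc : List β) :
    l.foldl (fun acc x => if p x then acc ++ F x else acc) acc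
      = acc ++ (l.filter p).flatMap F := by
  rw [← PySem.List.foldl_append_eq_flatMap F (l.filter p) acc, List.foldl_filter]

theorem portA_norm (s : String) (kws : List String) :
    extract_subject_fallback_text s kws
      = PySem.Str.join "\n" (pvDK PySem.Str.lower
          ((pvW (pvLines s).length (fun i => pvMatch kws ((pvLines s).getD i ""))
              (pvLines s).length).map (fun j => (pvLines s).getD j "")) []) := by
  unfold extract_subject_fallback_text
  dsimp only
  rw [foldl_enumerate_eq_range (pvLines s) "" _ []]
  dsimp only
  rw [show (fun (st : List String) (k : Nat) =>
        if pvMatch kws ((pvLines s).getD k "") = true then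
          st ++ PySem.List.slice (pvLines s) (some (max ((k : Int) - 2) 0))
            (some (min ((k : Int) + 5) (PySem.List.len (pvLines s))))
        else st)
      = (fun (st : List String) (k : Nat) =>
        if (fun i => pvMatch kws ((pvLines s).getD i "")) k = true then
          st ++ (pvWin (pvLines s).length k).map (fun j => (pvLines s).getD j "")
        else st) from funext fun st => funext fun k => by rw [slice_window_eq]]
  rw [foldl_append_if_list]
  rw [← List.map_flatMap]
  rw [foldl_dedup_eq_pvDK]
  rfl

theorem portB_norm (s : String) (kws : List String) :
    extract_subject_fallback_text_alt s kws
      = PySem.Str.join "\n" (pvDK PySem.Str.lower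
          (((List.range (pvLines s).length).filter
              (pvIncB (pvLines s).length (fun i => pvMatch kws ((pvLines s).getD i ""))
                (pvLines s).length)).map (fun j => (pvLines s).getD j "")) []) := by
  unfold extract_subject_fallback_text_alt
  dsimp only
  rw [foldl_enumerate_eq_range (pvLines s) "" _ ([], PySem.Set.empty)]
  dsimp only
  have hcg := PySem.List.foldl_congr_mem (List.range (pvLines s).length)
      (fun (st : List String × PySem.Set String) (k : Nat) =>
        if ((PySem.List.slice (List.map (fun line => pvMatch kws line) (pvLines s))
              (some (max ((k : Int) - 4) 0)) (some ((k : Int) + 3))).any fun b => b) = true then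
          if st.2.contains (PySem.Str.lower ((pvLines s).getD k "")) = true then st
          else (st.1 ++ [(pvLines s).getD k ""], st.2.add (PySem.Str.lower ((pvLines s).getD k "")))
        else st)
      (fun (st : List String × PySem.Set String) (k : Nat) =>
        if pvIncB (pvLines s).length (fun i => pvMatch kws ((pvLines s).getD i ""))
            (pvLines s).length k = true then
          if st.2.contains (PySem.Str.lower ((pvLines s).getD k "")) = true then st
          else (st.1 ++ [(pvLines s).getD k ""], st.2.add (PySem.Str.lower ((pvLines s).getD k "")))
        else st)
      ([], PySem.Set.empty)
      (by
        intro acc k hk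
        rw [List.mem_range] at hk
        dsimp only
        rw [slice_any_eq (pvLines s) kws k hk])
  rw [hcg]
  rw [← List.foldl_filter]
  rw [← List.foldl_map (f := fun j => (pvLines s).getD j "")
      (g := fun (st : List String × PySem.Set String) line =>
        if st.2.contains (PySem.Str.lower line) = true then st
        else (st.1 ++ [line], st.2.add (PySem.Str.lower line)))]
  rw [foldl_dedup_eq_pvDK]
  rfl

-- ===== VERDICT (by name: the statement is the Claim_ definition above) =====
theorem extract_subject_fallback_text_spec : Claim_equal_extract_subject_fallback_text := by
  intro s kws _
  unfold Spec_extract_subject_fallback_text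
  rw [portA_norm, portB_norm]
  congr 1
  rw [pvDK_map_pvDK PySem.Str.lower (fun j => (pvLines s).getD j "")
      (pvW (pvLines s).length (fun i => pvMatch kws ((pvLines s).getD i "")) (pvLines s).length)
      [] [] (fun i hi => absurd hi (by simp))]
  rw [pvDK_pvW (pvLines s).length (fun i => pvMatch kws ((pvLines s).getD i ""))
      (pvLines s).length le_rfl]
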